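-- pv_equiv track=rewrite | github.com/remintz/mapalinear | api/services/poi_quality_service.py | is_poi_abandoned
-- ===== SOURCE A (Python) =====
-- from typing import Any, Dict, List, Optional
--
-- def is_poi_abandoned(tags: Dict[str, Any]) -> bool:
--     """
--     Check if a POI is abandoned or out of use.
--
--     Args:
--         tags: Tags from geographic provider
--
--     Returns:
--         True if the POI should be excluded as abandoned
--     """
--     abandonment_indicators = [
--         "abandoned",
--         "disused",
--         "demolished",
--         "razed",
--         "removed",
--         "ruins",
--         "former",
--         "closed",
--         "destroyed",
--     ]
--
--     # Check direct abandonment tags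
--     for indicator in abandonment_indicators:
--         if tags.get(indicator) in ["yes", "true", "1"]:
--             return True
--         # Check prefixes (e.g., abandoned:amenity=fuel)
--         for key in tags.keys():
--             if key.startswith(f"{indicator}:"):
--                 return True
--
--     # Check specific status
--     if tags.get("opening_hours") in ["closed", "no"]:
--         return True
--
--     return False
-- ===== SOURCE B (Python) =====
-- def is_poi_abandoned(tags):
--     """Single pass over the tag items against a set of indicators, instead of
--     nine indicator-major scans of the whole dict."""
--     indicators = {
--         "abandoned", "disused", "demolished", "razed", "removed",
--         "ruins", "former", "closed", "destroyed",
--     }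
--     for key, value in tags.items():
--         if key in indicators and value in ("yes", "true", "1"):
--             return True
--         i = key.find(":")
--         if i != -1 and key[:i] in indicators:
--             return True
--     return tags.get("opening_hours") in ("closed", "no")
-- ===== Notes on version B (the rewrite author's own statement) =====
-- stated objective: faster
-- what changed: A makes nine indicator-major passes (one dict.get plus a full key scan per indicator); B builds one set of the nine indicators and makes a single pass over tags.items(), testing each key directly and, via the first colon, as a prefixed key. (Pre_ only excludes duplicate-key association lists, which no Python dict can produce)
import Mathlib
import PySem

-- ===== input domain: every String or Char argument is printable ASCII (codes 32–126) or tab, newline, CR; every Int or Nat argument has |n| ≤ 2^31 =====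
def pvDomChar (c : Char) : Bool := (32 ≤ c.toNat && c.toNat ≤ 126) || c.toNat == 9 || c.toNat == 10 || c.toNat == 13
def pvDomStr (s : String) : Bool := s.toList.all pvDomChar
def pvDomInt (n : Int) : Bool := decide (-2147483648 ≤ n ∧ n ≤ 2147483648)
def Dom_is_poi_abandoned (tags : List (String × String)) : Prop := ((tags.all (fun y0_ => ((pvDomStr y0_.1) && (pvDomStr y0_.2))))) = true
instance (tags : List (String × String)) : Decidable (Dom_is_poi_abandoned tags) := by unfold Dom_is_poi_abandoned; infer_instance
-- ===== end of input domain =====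

-- B replaces A's nine indicator-major scans of the dict by one pass over the items
-- against a set of indicators; return values proved equal for duplicate-free key lists.


-- ===== PORT A =====
-- A's abandonment_indicators list
def pvIndicators : List String :=
  ["abandoned", "disused", "demolished", "razed", "removed", "ruins", "former", "closed", "destroyed"]

-- literal port of A: for each indicator, check tags.get(indicator) in ["yes","true","1"],
-- then scan all keys for the "indicator:" prefix; finally the opening_hours guard.
def is_poi_abandoned (tags : List (String × String)) : Bool :=
  if pvIndicators.any (fun ind =>
       (["yes", "true", "1"].any (fun s => PySem.Dict.get? ⟨tags⟩ ind == some s))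
       || (PySem.Dict.keys ⟨tags⟩).any (fun key =>
             PySem.Chars.startswith key.toList (ind.toList ++ [':'])))
  then true
  else if ["closed", "no"].any (fun s => PySem.Dict.get? ⟨tags⟩ "opening_hours" == some s)
  then true
  else false

-- ===== PORT B =====
-- B's set literal of the nine indicators
def pvIndicatorSet : PySem.Set String :=
  PySem.Set.ofList
    ["abandoned", "disused", "demolished", "razed", "removed", "ruins", "former", "closed", "destroyed"]

-- B's single for-loop over tags.items(), with the final opening_hours return
def pvAltGo (tags : List (String × String)) : List (String × String) → Bool
  | [] => ["closed", "no"].any (fun s => PySem.Dict.get? ⟨tags⟩ "opening_hours" == some s)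
  | (k, v) :: rest =>
    if pvIndicatorSet.contains k && ["yes", "true", "1"].contains v then true
    else if (PySem.Str.find k ":" != -1)
             && pvIndicatorSet.contains (PySem.Str.slice k none (some (PySem.Str.find k ":"))) then true
    else pvAltGo tags rest

def is_poi_abandoned_alt (tags : List (String × String)) : Bool :=
  pvAltGo tags tags

-- ===== PRECONDITION & SPEC =====
-- tags encodes a Python dict, whose keys are unique: Pre_ excludes duplicate-key association
-- lists, which correspond to no dict input of A (A reads only the first binding of a key via
-- dict.get, while B's single pass reads every binding).
def Pre_is_poi_abandoned (tags : List (String × String)) : Prop := (tags.map Prod.fst).Nodup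
instance (tags : List (String × String)) : Decidable (Pre_is_poi_abandoned tags) := by
  unfold Pre_is_poi_abandoned; infer_instance

def pvWitness_is_poi_abandoned : (List (String × String)) := [("abandoned", "yes"), ("name", "X")]

def Spec_is_poi_abandoned (tags : List (String × String)) (out : Bool) : Prop := out = is_poi_abandoned_alt tags
instance (tags : List (String × String)) (out : Bool) : Decidable (Spec_is_poi_abandoned tags out) := by unfold Spec_is_poi_abandoned; infer_instance

-- ===== CLAIM (what is proved, stated in full; the proofs are below) =====
def Claim_equal_is_poi_abandoned : Prop := ∀ (tags : List (String × String)), Dom_is_poi_abandoned tags → Pre_is_poi_abandoned tags → Spec_is_poi_abandoned tags (is_poi_abandoned tags)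

-- ===== LEMMAS AND PROOFS =====

-- B's per-item test and the final guard, named for the loop characterisation
def pvCondB (k v : String) : Bool :=
  (pvIndicatorSet.contains k && ["yes", "true", "1"].contains v)
  || ((PySem.Str.find k ":" != -1)
      && pvIndicatorSet.contains (PySem.Str.slice k none (some (PySem.Str.find k ":"))))

def pvHours (tags : List (String × String)) : Bool :=
  ["closed", "no"].any (fun s => PySem.Dict.get? ⟨tags⟩ "opening_hours" == some s)

-- B's loop = "some item passes the per-item test" or-else the opening_hours guard
theorem pvAltGo_eq (tags l) :
    pvAltGo tags l = ((l.any fun kv => pvCondB kv.1 kv.2) || pvHours tags) := by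
  induction l with
  | nil => simp only [pvAltGo, List.any_nil, Bool.false_or]; rfl
  | cons kv rest ih =>
    obtain ⟨k, v⟩ := kv
    show (if _ then true else if _ then true else pvAltGo tags rest) = _
    split_ifs with h1 h2
    · simp only [List.any_cons, pvCondB, h1, Bool.true_or]
    · rw [Bool.not_eq_true] at h1
      simp only [List.any_cons, pvCondB, h1, h2, Bool.false_or, Bool.true_or]
    · rw [Bool.not_eq_true] at h1 h2
      simp only [List.any_cons, pvCondB, h1, h2, Bool.false_or, ih]

-- the nine indicators are colon-free
theorem pvIndicators_colon_free : ∀ ind ∈ pvIndicators, ':' ∉ ind.toList := by decide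

theorem pvMemSet_iff (x : String) : x ∈ pvIndicatorSet ↔ x ∈ pvIndicators :=
  PySem.Set.mem_ofList _ x

-- on a duplicate-free association list, a stored pair is what first-match lookup returns
theorem pvFind?_key_of_mem {tags : List (String × String)} {kv : String × String}
    (h : (tags.map Prod.fst).Nodup) (hm : kv ∈ tags) :
    tags.find? (fun p => p.1 == kv.1) = some kv := by
  induction tags with
  | nil => cases hm
  | cons hd tl ih =>
    rw [List.map_cons, List.nodup_cons] at h
    obtain ⟨hnotin, htl⟩ := h
    rcases List.mem_cons.mp hm with rfl | hm'
    · rw [List.find?_cons_of_pos (by simp)]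
    · have hne : (hd.1 == kv.1) = false := by
        apply beq_eq_false_iff_ne.mpr
        intro he
        exact hnotin (he ▸ List.mem_map_of_mem hm')
      rw [List.find?_cons_of_neg (by simp [hne])]
      exact ih htl hm'

theorem pvGet?_eq_some_of_mem {tags : List (String × String)} {kv : String × String}
    (h : (tags.map Prod.fst).Nodup) (hm : kv ∈ tags) :
    PySem.Dict.get? ⟨tags⟩ kv.1 = some kv.2 := by
  show Option.map _ (List.find? _ tags) = _
  rw [pvFind?_key_of_mem h hm]
  rfl

theorem pvGet?_some_mem {tags : List (String × String)} {k v : String}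
    (h : PySem.Dict.get? ⟨tags⟩ k = some v) : (k, v) ∈ tags := by
  have h' : Option.map (fun p => p.2) (List.find? (fun p => p.1 == k) tags) = some v := h
  cases hf : List.find? (fun p : String × String => p.1 == k) tags with
  | none => rw [hf] at h'; simp at h'
  | some p =>
    obtain ⟨p1, p2⟩ := p
    rw [hf] at h'
    simp only [Option.map_some, Option.some.injEq] at h'
    have hp := List.mem_of_find?_eq_some hf
    have hk : p1 = k := by simpa using List.find?_some hf
    rw [← h', ← hk]
    exact hp

-- "ind:" is a prefix of cs  iff  cs has a colon and its first-colon prefix is ind (ind colon-free)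
theorem pvPrefix_core (cs ds : List Char) (hds : ':' ∉ ds) :
    (ds ++ [':']) <+: cs ↔
      (PySem.Chars.find cs [':'] ≠ -1 ∧
        List.take (PySem.Chars.find cs [':']).toNat cs = ds) := by
  constructor
  · rintro ⟨t, rfl⟩
    have hinf : [':'] <:+: (ds ++ [':']) ++ t := ⟨ds, t, by simp⟩
    have hne : PySem.Chars.find ((ds ++ [':']) ++ t) [':'] ≠ -1 :=
      (PySem.Chars.find_ne_neg_one_iff _ _).mpr hinf
    have h0 : 0 ≤ PySem.Chars.find ((ds ++ [':']) ++ t) [':'] := by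
      have := PySem.Chars.neg_one_le_find ((ds ++ [':']) ++ t) [':']
      omega
    obtain ⟨hpre, hmin⟩ := PySem.Chars.find_spec h0
    have hdrop : (((ds ++ [':']) ++ t).drop ds.length) = ':' :: t := by
      rw [List.append_assoc]
      exact List.drop_left
    have hle : (PySem.Chars.find ((ds ++ [':']) ++ t) [':']).toNat ≤ ds.length := by
      by_contra hlt
      exact hmin ds.length (by omega) (by rw [hdrop]; exact ⟨t, rfl⟩)
    have hge : ds.length ≤ (PySem.Chars.find ((ds ++ [':']) ++ t) [':']).toNat := by
      by_contra hlt
      rw [Nat.not_le] at hlt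
      obtain ⟨t2, ht2⟩ := hpre
      have h1 : ((ds ++ [':']) ++ t)[(PySem.Chars.find ((ds ++ [':']) ++ t) [':']).toNat]? = some ':' := by
        have hd0 := List.getElem?_drop (xs := (ds ++ [':']) ++ t)
          (i := (PySem.Chars.find ((ds ++ [':']) ++ t) [':']).toNat) (j := 0)
        rw [← ht2] at hd0
        simp only [Nat.add_zero, List.getElem?_cons_zero, List.cons_append] at hd0
        exact hd0.symm
      rw [List.getElem?_append_left
          (by simp only [List.length_append, List.length_cons, List.length_nil]; omega),
        List.getElem?_append_left hlt] at h1
      exact hds (List.mem_of_getElem? h1)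
    have hfeq : (PySem.Chars.find ((ds ++ [':']) ++ t) [':']).toNat = ds.length :=
      le_antisymm hle hge
    refine ⟨hne, ?_⟩
    rw [hfeq, List.append_assoc]
    exact List.take_left
  · rintro ⟨hne, htake⟩
    have h0 : 0 ≤ PySem.Chars.find cs [':'] := by
      have := PySem.Chars.neg_one_le_find cs [':']
      omega
    obtain ⟨hpre, -⟩ := PySem.Chars.find_spec h0
    obtain ⟨t2, ht2⟩ := hpre
    refine ⟨t2, ?_⟩
    have hsplit : ds ++ [':'] ++ t2 =
        List.take (PySem.Chars.find cs [':']).toNat cs ++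
          List.drop (PySem.Chars.find cs [':']).toNat cs := by
      rw [htake, ← ht2]
      simp
    exact hsplit.trans (List.take_append_drop _ _)

-- B's per-key colon test equals A's "some indicator-prefix matches"
theorem pvKey_iff (k : String) :
    (PySem.Chars.find k.toList [':'] ≠ -1 ∧
      PySem.Str.slice k none (some (PySem.Chars.find k.toList [':'])) ∈ pvIndicatorSet) ↔
    (∃ ind ∈ pvIndicators, (ind.toList ++ [':']) <+: k.toList) := by
  constructor
  · rintro ⟨hne, hmem⟩
    have h0 : 0 ≤ PySem.Chars.find k.toList [':'] := by
      have := PySem.Chars.neg_one_le_find k.toList [':']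
      omega
    have hmem' : PySem.Str.slice k none (some (PySem.Chars.find k.toList [':'])) ∈ pvIndicators :=
      (pvMemSet_iff _).mp hmem
    have hts : (PySem.Str.slice k none (some (PySem.Chars.find k.toList [':']))).toList
        = List.take (PySem.Chars.find k.toList [':']).toNat k.toList := by
      rw [PySem.Str.toList_slice, PySem.Chars.slice_eq_listSlice, PySem.List.slice_to _ h0]
    exact ⟨_, hmem',
      (pvPrefix_core k.toList _ (pvIndicators_colon_free _ hmem')).mpr ⟨hne, hts.symm⟩⟩
  · rintro ⟨ind, hind, hpre⟩
    obtain ⟨hne, htake⟩ :=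
      (pvPrefix_core k.toList ind.toList (pvIndicators_colon_free ind hind)).mp hpre
    have h0 : 0 ≤ PySem.Chars.find k.toList [':'] := by
      have := PySem.Chars.neg_one_le_find k.toList [':']
      omega
    refine ⟨hne, ?_⟩
    have hsl : PySem.Str.slice k none (some (PySem.Chars.find k.toList [':'])) = ind := by
      apply String.toList_inj.mp
      rw [PySem.Str.toList_slice, PySem.Chars.slice_eq_listSlice, PySem.List.slice_to _ h0, htake]
    rw [hsl]
    exact (pvMemSet_iff ind).mpr hind

-- the indicator-major scan of A equals the item-major scan of B (keys duplicate-free)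
theorem pvAny_eq (tags : List (String × String)) (h : (tags.map Prod.fst).Nodup) :
    (pvIndicators.any (fun ind =>
       (["yes", "true", "1"].any (fun s => PySem.Dict.get? ⟨tags⟩ ind == some s))
       || (PySem.Dict.keys ⟨tags⟩).any (fun key =>
             PySem.Chars.startswith key.toList (ind.toList ++ [':']))))
    = tags.any (fun kv => pvCondB kv.1 kv.2) := by
  rw [Bool.eq_iff_iff]
  simp only [List.any_eq_true, Bool.or_eq_true, Bool.and_eq_true, beq_iff_eq, bne_iff_ne, ne_eq,
    pvCondB, PySem.Set.contains, List.contains_iff_mem, PySem.Str.find_eq,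
    PySem.Dict.keys, List.mem_map, PySem.Chars.startswith_iff,
    show (":" : String).toList = [':'] from rfl]
  constructor
  · rintro ⟨ind, hind, hcase⟩
    rcases hcase with ⟨s, hs, hget⟩ | ⟨key, ⟨a, ha, rfl⟩, hpre⟩
    · exact ⟨(ind, s), pvGet?_some_mem hget, Or.inl ⟨(pvMemSet_iff ind).mpr hind, hs⟩⟩
    · exact ⟨a, ha, Or.inr ((pvKey_iff a.1).mpr ⟨ind, hind, hpre⟩)⟩
  · rintro ⟨kv, hkv, hcase⟩
    rcases hcase with ⟨hmem, hv⟩ | hcol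
    · exact ⟨kv.1, (pvMemSet_iff kv.1).mp hmem,
        Or.inl ⟨kv.2, hv, pvGet?_eq_some_of_mem h hkv⟩⟩
    · obtain ⟨ind, hind, hpre⟩ := (pvKey_iff kv.1).mp hcol
      exact ⟨ind, hind, Or.inr ⟨kv.1, ⟨kv, hkv, rfl⟩, hpre⟩⟩

theorem pvMain (tags : List (String × String)) (h : (tags.map Prod.fst).Nodup) :
    is_poi_abandoned tags = is_poi_abandoned_alt tags := by
  unfold is_poi_abandoned is_poi_abandoned_alt
  rw [pvAltGo_eq, pvAny_eq tags h]
  have hif : ∀ a b : Bool, (if a then true else if b then true else false) = (a || b) := by decide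
  simp only [pvHours]
  rw [hif]

-- ===== VERDICT (by name: the statement is the Claim_ definition above) =====
theorem is_poi_abandoned_spec : Claim_equal_is_poi_abandoned := by
  intro tags _ hpre
  unfold Spec_is_poi_abandoned
  exact pvMain tags hpre
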